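-- pv_equiv track=rewrite | github.com/Botacin-s-Lab/auto-installer | brain_agent.py | _is_allowed_action
-- ===== SOURCE A (Python) =====
-- ALLOWED_SIMPLE_KEYS = {
--     "tab",
--     "enter",
--     "space",
--     "esc",
--     "up",
--     "down",
--     "left",
--     "right",
--     "home",
--     "end",
--     "pagedown",
--     "pageup",
-- }
--
-- ALLOWED_MODIFIERS = {"alt", "shift", "ctrl"}
--
-- def _is_allowed_action(keys: list[str]) -> bool:
--     if not keys:
--         return False
--     if len(keys) == 1:
--         token = keys[0]
--         return token in ALLOWED_SIMPLE_KEYS or (len(token) == 1 and token.isalnum())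
--
--     modifiers = [k for k in keys if k in ALLOWED_MODIFIERS]
--     non_modifiers = [k for k in keys if k not in ALLOWED_MODIFIERS]
--     if len(non_modifiers) != 1:
--         return False
--     if len(modifiers) != len(keys) - 1:
--         return False
--     target = non_modifiers[0]
--     if target in ALLOWED_SIMPLE_KEYS:
--         return True
--     return len(target) == 1 and target.isalnum()
-- ===== SOURCE B (Python) =====
-- ALLOWED_SIMPLE_KEYS = {
--     "tab",
--     "enter",
--     "space",
--     "esc",
--     "up",
--     "down",
--     "left",
--     "right",
--     "home",
--     "end",
--     "pagedown",
--     "pageup",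
-- }
--
-- ALLOWED_MODIFIERS = {"alt", "shift", "ctrl"}
--
--
-- def _is_allowed_action(keys: list) -> bool:
--     # Single left-to-right pass with a one-slot accumulator: remember the first
--     # non-modifier seen, abort immediately on a second one; no intermediate
--     # lists, no length arithmetic, no special case for len(keys) == 1.
--     target = None
--     for k in keys:
--         if k in ALLOWED_MODIFIERS:
--             continue
--         if target is not None:
--             return False  # second non-modifier: early exit
--         target = k
--     if target is None:
--         return False  # empty combo or modifiers only
--     return target in ALLOWED_SIMPLE_KEYS or (len(target) == 1 and target.isalnum())
-- ===== Notes on version B (the rewrite author's own statement) =====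
-- stated objective: faster
-- what changed: A builds two filtered lists plus a length-arithmetic check and a separate len(keys)==1 branch; B is a single left-to-right state-machine pass with a one-slot accumulator (first non-modifier seen) that early-exits on a second non-modifier and validates the remembered target at the end, allocating no intermediate lists.
import Mathlib
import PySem

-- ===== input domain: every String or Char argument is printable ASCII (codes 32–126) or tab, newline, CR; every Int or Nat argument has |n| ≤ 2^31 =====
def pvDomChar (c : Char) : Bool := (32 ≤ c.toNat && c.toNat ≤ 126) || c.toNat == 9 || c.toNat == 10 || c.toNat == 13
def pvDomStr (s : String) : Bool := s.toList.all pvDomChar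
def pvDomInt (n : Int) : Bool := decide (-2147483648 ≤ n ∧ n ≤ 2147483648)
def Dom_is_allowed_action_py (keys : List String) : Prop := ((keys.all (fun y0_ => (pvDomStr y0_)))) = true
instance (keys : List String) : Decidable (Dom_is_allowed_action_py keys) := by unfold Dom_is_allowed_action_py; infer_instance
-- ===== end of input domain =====

-- B replaces A's staged filter passes and special-cased branches by a single state-machine
-- pass with a one-slot accumulator and early exit and no intermediate lists (objective: faster; measured faster in a timing run).

-- module constants shared by both Pythons
def ALLOWED_SIMPLE_KEYS : PySem.Set String := PySem.Set.ofList
  ["tab", "enter", "space", "esc", "up", "down", "left", "right", "home", "end", "pagedown", "pageup"]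
def ALLOWED_MODIFIERS : PySem.Set String := PySem.Set.ofList ["alt", "shift", "ctrl"]

-- ===== PORT A =====
def is_allowed_action_py (keys : List String) : Bool :=
  if keys = [] then false
  else if keys.length == 1 then
    let token := PySem.List.pyGetD keys 0 ""
    ALLOWED_SIMPLE_KEYS.contains token || (PySem.Str.len token == 1 && PySem.Str.strIsalnum token)
  else
    let modifiers := keys.filter (fun k => ALLOWED_MODIFIERS.contains k)
    let non_modifiers := keys.filter (fun k => !ALLOWED_MODIFIERS.contains k)
    if non_modifiers.length != 1 then false
    else if (modifiers.length : Int) != (keys.length : Int) - 1 then false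
    else
      let target := PySem.List.pyGetD non_modifiers 0 ""
      if ALLOWED_SIMPLE_KEYS.contains target then true
      else PySem.Str.len target == 1 && PySem.Str.strIsalnum target

-- ===== PORT B =====
-- the loop of Source B: structural recursion over the keys with the one-slot accumulator
def alt_scan : List String → Option String → Bool
  | [], none => false
  | [], some target =>
      ALLOWED_SIMPLE_KEYS.contains target ||
        (PySem.Str.len target == 1 && PySem.Str.strIsalnum target)
  | k :: rest, acc =>
      if ALLOWED_MODIFIERS.contains k then alt_scan rest acc
      else match acc with
        | some _ => false          -- second non-modifier: early exit
        | none => alt_scan rest (some k)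

def is_allowed_action_py_alt (keys : List String) : Bool :=
  alt_scan keys none

-- ===== PRECONDITION & SPEC =====
def Spec_is_allowed_action_py (keys : List String) (out : Bool) : Prop := out = is_allowed_action_py_alt keys
instance (keys : List String) (out : Bool) : Decidable (Spec_is_allowed_action_py keys out) := by unfold Spec_is_allowed_action_py; infer_instance

-- ===== CLAIM (what is proved, stated in full; the proofs are below) =====
def Claim_equal_is_allowed_action_py : Prop := ∀ (keys : List String), Dom_is_allowed_action_py keys → Spec_is_allowed_action_py keys (is_allowed_action_py keys)

-- ===== LEMMAS AND PROOFS =====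

def pv_valid (t : String) : Bool :=
  ALLOWED_SIMPLE_KEYS.contains t || (PySem.Str.len t == 1 && PySem.Str.strIsalnum t)

-- characterisation of B's scan by the list of non-modifier keys
lemma pv_scan_some (l : List String) (t : String) :
    alt_scan l (some t) =
      if l.filter (fun k => !ALLOWED_MODIFIERS.contains k) = [] then pv_valid t else false := by
  induction l with
  | nil => simp [alt_scan, pv_valid]
  | cons a rest ih =>
      by_cases h : a ∈ ALLOWED_MODIFIERS <;>
        simp [alt_scan, PySem.Set.contains, h, ih]

lemma pv_scan_none (l : List String) :
    alt_scan l none =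
      (match l.filter (fun k => !ALLOWED_MODIFIERS.contains k) with
       | [t] => pv_valid t
       | _ => false) := by
  induction l with
  | nil => simp [alt_scan]
  | cons a rest ih =>
      by_cases h : a ∈ ALLOWED_MODIFIERS
      · simp [alt_scan, PySem.Set.contains, h, ih]
      · have h1 : alt_scan (a :: rest) none = alt_scan rest (some a) := by
          simp [alt_scan, PySem.Set.contains, h]
        rw [h1, pv_scan_some]
        simp only [PySem.Set.contains] at ⊢
        cases hc : rest.filter (fun k => !decide (k ∈ ALLOWED_MODIFIERS)) <;>
          simp [hc, h]

-- the filter partition: modifiers and non-modifiers together account for every key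
lemma pv_len_split (p : String → Bool) (l : List String) :
    (l.filter p).length + (l.filter (fun x => !p x)).length = l.length := by
  induction l with
  | nil => simp
  | cons a t ih => by_cases h : p a = true <;> simp [h] <;> omega

lemma pv_mod_cases (t : String) (h : ALLOWED_MODIFIERS.contains t = true) :
    t = "alt" ∨ t = "shift" ∨ t = "ctrl" := by
  simp [ALLOWED_MODIFIERS, PySem.Set.contains, PySem.Set.ofList] at h
  tauto

lemma pv_multi (l : List String) (h0 : l ≠ []) (h2 : l.length ≠ 1) :
    is_allowed_action_py l = is_allowed_action_py_alt l := by
  unfold is_allowed_action_py is_allowed_action_py_alt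
  rw [pv_scan_none, if_neg h0, if_neg (by simp [h2] : ¬((l.length == 1) = true))]
  set nm := l.filter (fun k => !ALLOWED_MODIFIERS.contains k) with hnm
  set m := l.filter (fun k => ALLOWED_MODIFIERS.contains k) with hm
  by_cases h1 : nm.length = 1
  · obtain ⟨x, hx⟩ := List.length_eq_one_iff.mp h1
    have hsum : m.length + nm.length = l.length := by
      rw [hnm, hm]; exact pv_len_split (fun k => ALLOWED_MODIFIERS.contains k) l
    have hlpos : l.length ≠ 0 := by simpa using h0
    have hmlen : (m.length : Int) = (l.length : Int) - 1 := by omega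
    rw [if_neg (by simp [h1] : ¬((nm.length != 1) = true)),
        if_neg (by simp [hmlen] : ¬(((m.length : Int) != (l.length : Int) - 1) = true)),
        hx]
    cases hc : ALLOWED_SIMPLE_KEYS.contains x <;>
      simp [pv_valid, PySem.List.pyGetD]
  · rw [if_pos (by simp [h1] : (nm.length != 1) = true)]
    cases hcase : nm with
    | nil => rfl
    | cons x tl =>
      cases tl with
      | nil => exact absurd (by rw [hcase]; rfl) h1
      | cons y tl2 => rfl

lemma pv_main (keys : List String) : is_allowed_action_py keys = is_allowed_action_py_alt keys := by
  match keys with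
  | [] => rfl
  | [t] =>
    by_cases h : ALLOWED_MODIFIERS.contains t = true
    · rcases pv_mod_cases t h with rfl | rfl | rfl <;> rfl
    · have h' : ¬t = "alt" ∧ ¬t = "shift" ∧ ¬t = "ctrl" := by
        simpa [ALLOWED_MODIFIERS, PySem.Set.contains, PySem.Set.ofList] using h
      simp [is_allowed_action_py, is_allowed_action_py_alt, alt_scan,
        ALLOWED_MODIFIERS, PySem.Set.ofList, h'.1, h'.2.1, h'.2.2, PySem.List.pyGetD]
  | a :: b :: rest => exact pv_multi (a :: b :: rest) (by simp) (by simp)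

-- ===== VERDICT (by name: the statement is the Claim_ definition above) =====
theorem is_allowed_action_py_spec : Claim_equal_is_allowed_action_py := by
  intro keys _
  unfold Spec_is_allowed_action_py
  exact pv_main keys
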